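-- pv_equiv track=rewrite | github.com/SEVAPROJECT/b2bproyecto | backend/app/api/v1/routers/users/auth_user_admin/admin_router.py | determine_main_role
-- ===== SOURCE A (Python) =====
-- def determine_main_role(roles: list[str]) -> str:
--     """Determina el rol principal basado en los roles del usuario"""
--     normalized_roles = [rol.lower().strip() for rol in roles]
--
--     if any(admin_role in normalized_roles for admin_role in ["admin", "administrador", "administrator"]):
--         return "admin"  # Valor que espera el frontend
--     elif any(provider_role in normalized_roles for provider_role in ["provider", "proveedor", "proveedores"]):
--         return "provider"  # Valor que espera el frontend
--     elif any(client_role in normalized_roles for client_role in ["client", "cliente"]):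
--         return "client"  # Valor que espera el frontend
--     return "client"  # Valor por defecto que espera el frontend
-- ===== SOURCE B (Python) =====
-- _ALIASES = {
--     "admin": "admin", "administrador": "admin", "administrator": "admin",
--     "provider": "provider", "proveedor": "provider", "proveedores": "provider",
--     "client": "client", "cliente": "client",
-- }
--
-- def determine_main_role(roles: list[str]) -> str:
--     """Determina el rol principal basado en los roles del usuario"""
--     found = set()
--     for rol in roles:
--         canonical = _ALIASES.get(rol.lower().strip())
--         if canonical is not None:
--             found.add(canonical)
--     for role in ("admin", "provider", "client"):
--         if role in found:
--             return role
--     return "client"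
-- ===== Notes on version B (the rewrite author's own statement) =====
-- stated objective: simpler
-- what changed: Replaced the three alias lists repeatedly scanned against the normalized list with a single alias->canonical dict: one classification pass over the roles collects the canonical roles present into a set, then a fixed priority list is scanned once.
import Mathlib
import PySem

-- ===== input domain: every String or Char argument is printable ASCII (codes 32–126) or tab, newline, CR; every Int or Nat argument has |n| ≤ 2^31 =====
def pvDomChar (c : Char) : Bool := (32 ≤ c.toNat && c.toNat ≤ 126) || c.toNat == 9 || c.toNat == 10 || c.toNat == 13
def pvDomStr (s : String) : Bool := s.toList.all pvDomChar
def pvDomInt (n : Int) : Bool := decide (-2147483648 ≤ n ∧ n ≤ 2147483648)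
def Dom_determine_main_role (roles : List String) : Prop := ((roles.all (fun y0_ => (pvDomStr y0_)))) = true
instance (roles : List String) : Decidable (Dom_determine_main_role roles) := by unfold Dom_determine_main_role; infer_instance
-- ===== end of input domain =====

-- B replaces A's three alias-list scans over the normalized roles with a single
-- alias->canonical dict, one classification pass into a set, and a priority scan (objective: simpler).

-- ===== PORT A =====
def determine_main_role (roles : List String) : String :=
  let normalized := roles.map (fun rol => PySem.Str.strip (PySem.Str.lower rol))
  if ["admin", "administrador", "administrator"].any (fun a => normalized.contains a) then "admin"
  else if ["provider", "proveedor", "proveedores"].any (fun a => normalized.contains a) then "provider"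
  else if ["client", "cliente"].any (fun a => normalized.contains a) then "client"
  else "client"

-- ===== PORT B =====
def roleAliases : PySem.Dict String String :=
  PySem.Dict.ofList
    [("admin", "admin"), ("administrador", "admin"), ("administrator", "admin"),
     ("provider", "provider"), ("proveedor", "provider"), ("proveedores", "provider"),
     ("client", "client"), ("cliente", "client")]

def determine_main_role_alt (roles : List String) : String :=
  let found : PySem.Set String := roles.foldl (fun s rol =>
    match PySem.Dict.get? roleAliases (PySem.Str.strip (PySem.Str.lower rol)) with
    | some canonical => PySem.Set.add s canonical
    | none => s) PySem.Set.empty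
  match ["admin", "provider", "client"].find? (fun role => PySem.Set.contains found role) with
  | some role => role
  | none => "client"

-- ===== PRECONDITION & SPEC =====
def Spec_determine_main_role (roles : List String) (out : String) : Prop := out = determine_main_role_alt roles
instance (roles : List String) (out : String) : Decidable (Spec_determine_main_role roles out) := by unfold Spec_determine_main_role; infer_instance

-- ===== CLAIM (what is proved, stated in full; the proofs are below) =====
def Claim_equal_determine_main_role : Prop := ∀ (roles : List String), Dom_determine_main_role roles → Spec_determine_main_role roles (determine_main_role roles)

-- ===== LEMMAS AND PROOFS =====

theorem roleAliases_eq_mk : roleAliases = PySem.Dict.mk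
    [("admin", "admin"), ("administrador", "admin"), ("administrator", "admin"),
     ("provider", "provider"), ("proveedor", "provider"), ("proveedores", "provider"),
     ("client", "client"), ("cliente", "client")] := by decide

theorem lookup_admin (x : String) :
    PySem.Dict.get? roleAliases x = some "admin" ↔ x ∈ ["admin", "administrador", "administrator"] := by
  rw [roleAliases_eq_mk]
  simp only [PySem.Dict.get?_mk_cons]
  split_ifs <;> simp_all [PySem.Dict.get?] <;> (try (subst_vars; decide)); aesop

theorem lookup_provider (x : String) :
    PySem.Dict.get? roleAliases x = some "provider" ↔ x ∈ ["provider", "proveedor", "proveedores"] := by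
  rw [roleAliases_eq_mk]
  simp only [PySem.Dict.get?_mk_cons]
  split_ifs <;> simp_all [PySem.Dict.get?] <;> (try (subst_vars; decide)); aesop

-- membership in the set built by B's classification pass
theorem mem_found_iff (roles : List String) (s : PySem.Set String) (c : String) :
    c ∈ roles.foldl (fun s rol =>
      match PySem.Dict.get? roleAliases (PySem.Str.strip (PySem.Str.lower rol)) with
      | some canonical => PySem.Set.add s canonical
      | none => s) s ↔
    c ∈ s ∨ ∃ r ∈ roles, PySem.Dict.get? roleAliases (PySem.Str.strip (PySem.Str.lower r)) = some c := by
  induction roles generalizing s with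
  | nil => simp
  | cons h t ih =>
    simp only [List.foldl_cons]
    rw [ih]
    cases hg : PySem.Dict.get? roleAliases (PySem.Str.strip (PySem.Str.lower h)) with
    | none => simp [hg]
    | some x =>
      simp only [PySem.Set.mem_add, List.mem_cons]
      constructor
      · rintro ((hs | rfl) | ⟨r, hr, hp⟩)
        · exact Or.inl hs
        · exact Or.inr ⟨h, Or.inl rfl, hg⟩
        · exact Or.inr ⟨r, Or.inr hr, hp⟩
      · rintro (hs | ⟨r, (rfl | hr), hp⟩)
        · exact Or.inl (Or.inl hs)
        · have hx : x = c := by rw [hg] at hp; exact Option.some.inj hp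
          exact Or.inl (Or.inr hx.symm)
        · exact Or.inr ⟨r, hr, hp⟩

-- ===== VERDICT (by name: the statement is the Claim_ definition above) =====
theorem determine_main_role_spec : Claim_equal_determine_main_role := by
  intro roles _
  unfold Spec_determine_main_role determine_main_role determine_main_role_alt
  simp only []
  by_cases hA : ∃ r ∈ roles, PySem.Str.strip (PySem.Str.lower r) ∈ (["admin", "administrador", "administrator"] : List String)
  · have h1 : (["admin", "administrador", "administrator"].any
        (fun a => (roles.map (fun rol => PySem.Str.strip (PySem.Str.lower rol))).contains a)) = true := by
      simp only [List.any_eq_true, List.contains_iff_mem, List.mem_map]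
      obtain ⟨r, hr, hm⟩ := hA
      exact ⟨_, hm, r, hr, rfl⟩
    have h2 : PySem.Set.contains (roles.foldl (fun s rol =>
        match PySem.Dict.get? roleAliases (PySem.Str.strip (PySem.Str.lower rol)) with
        | some canonical => PySem.Set.add s canonical
        | none => s) PySem.Set.empty) "admin" = true := by
      rw [PySem.Set.contains_iff, mem_found_iff]
      obtain ⟨r, hr, hm⟩ := hA
      exact Or.inr ⟨r, hr, (lookup_admin _).mpr hm⟩
    rw [if_pos h1]
    simp only [List.find?, h2]
  · have h1 : (["admin", "administrador", "administrator"].any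
        (fun a => (roles.map (fun rol => PySem.Str.strip (PySem.Str.lower rol))).contains a)) = false := by
      rw [← Bool.not_eq_true]
      simp only [List.any_eq_true, List.contains_iff_mem, List.mem_map]
      rintro ⟨a, ha, r, hr, rfl⟩
      exact hA ⟨r, hr, ha⟩
    have h2 : PySem.Set.contains (roles.foldl (fun s rol =>
        match PySem.Dict.get? roleAliases (PySem.Str.strip (PySem.Str.lower rol)) with
        | some canonical => PySem.Set.add s canonical
        | none => s) PySem.Set.empty) "admin" = false := by
      rw [← Bool.not_eq_true, PySem.Set.contains_iff, mem_found_iff]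
      rintro (hc | ⟨r, hr, hm⟩)
      · exact absurd hc (List.not_mem_nil)
      · exact hA ⟨r, hr, (lookup_admin _).mp hm⟩
    by_cases hP : ∃ r ∈ roles, PySem.Str.strip (PySem.Str.lower r) ∈ (["provider", "proveedor", "proveedores"] : List String)
    · have h3 : (["provider", "proveedor", "proveedores"].any
          (fun a => (roles.map (fun rol => PySem.Str.strip (PySem.Str.lower rol))).contains a)) = true := by
        simp only [List.any_eq_true, List.contains_iff_mem, List.mem_map]
        obtain ⟨r, hr, hm⟩ := hP
        exact ⟨_, hm, r, hr, rfl⟩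
      have h4 : PySem.Set.contains (roles.foldl (fun s rol =>
          match PySem.Dict.get? roleAliases (PySem.Str.strip (PySem.Str.lower rol)) with
          | some canonical => PySem.Set.add s canonical
          | none => s) PySem.Set.empty) "provider" = true := by
        rw [PySem.Set.contains_iff, mem_found_iff]
        obtain ⟨r, hr, hm⟩ := hP
        exact Or.inr ⟨r, hr, (lookup_provider _).mpr hm⟩
      rw [if_neg (by rw [h1]; exact Bool.false_ne_true), if_pos h3]
      simp only [List.find?, h2, h4]
    · have h3 : (["provider", "proveedor", "proveedores"].any
          (fun a => (roles.map (fun rol => PySem.Str.strip (PySem.Str.lower rol))).contains a)) = false := by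
        rw [← Bool.not_eq_true]
        simp only [List.any_eq_true, List.contains_iff_mem, List.mem_map]
        rintro ⟨a, ha, r, hr, rfl⟩
        exact hP ⟨r, hr, ha⟩
      have h4 : PySem.Set.contains (roles.foldl (fun s rol =>
          match PySem.Dict.get? roleAliases (PySem.Str.strip (PySem.Str.lower rol)) with
          | some canonical => PySem.Set.add s canonical
          | none => s) PySem.Set.empty) "provider" = false := by
        rw [← Bool.not_eq_true, PySem.Set.contains_iff, mem_found_iff]
        rintro (hc | ⟨r, hr, hm⟩)
        · exact absurd hc (List.not_mem_nil)
        · exact hP ⟨r, hr, (lookup_provider _).mp hm⟩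
      rw [if_neg (by rw [h1]; exact Bool.false_ne_true), if_neg (by rw [h3]; exact Bool.false_ne_true)]
      cases hc : PySem.Set.contains (roles.foldl (fun s rol =>
          match PySem.Dict.get? roleAliases (PySem.Str.strip (PySem.Str.lower rol)) with
          | some canonical => PySem.Set.add s canonical
          | none => s) PySem.Set.empty) "client" with
      | true => simp only [List.find?, h2, h4, hc]; split_ifs <;> rfl
      | false => simp only [List.find?, h2, h4, hc]; split_ifs <;> rfl
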